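-- pv_equiv track=rewrite | github.com/nemesszili/gaitrec | util/features.py | _maxima
-- ===== SOURCE A (Python) =====
-- def _maxima(vals):
--     maxx = vals[0][0]
--     maxy = vals[0][1]
--     maxz = vals[0][2]
--
--     for val in vals:
--         if maxx < val[0]:
--             maxx = val[0]
--
--         if maxy < val[1]:
--             maxy = val[1]
--
--         if maxz < val[2]:
--             maxz = val[2]
--
--     return [maxx, maxy, maxz]
-- ===== SOURCE B (Python) =====
-- def _maxima(vals):
--     return [max(v[i] for v in vals) for i in range(3)]
-- ===== Notes on version B (the rewrite author's own statement) =====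
-- stated objective: idiomatic
-- what changed: Replaces the single interleaved loop updating three accumulators seeded from vals[0] by three independent per-column max() reductions, one per index.
-- outside the precondition, e.g. on _maxima([]): A raises IndexError, B raises ValueError
import Mathlib
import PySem

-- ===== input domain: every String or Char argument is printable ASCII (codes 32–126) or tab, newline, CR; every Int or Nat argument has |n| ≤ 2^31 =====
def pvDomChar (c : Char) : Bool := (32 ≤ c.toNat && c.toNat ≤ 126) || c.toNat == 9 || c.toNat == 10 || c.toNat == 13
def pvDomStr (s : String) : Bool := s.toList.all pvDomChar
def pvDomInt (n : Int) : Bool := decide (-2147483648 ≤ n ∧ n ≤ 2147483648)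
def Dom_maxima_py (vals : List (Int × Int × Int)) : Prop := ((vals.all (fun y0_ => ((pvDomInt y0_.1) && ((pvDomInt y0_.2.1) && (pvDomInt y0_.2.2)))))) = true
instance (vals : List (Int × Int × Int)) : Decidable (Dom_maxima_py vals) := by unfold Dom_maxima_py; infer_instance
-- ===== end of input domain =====

-- B computes the three column maxima independently (one max() reduction per column)
-- instead of A's single interleaved pass over three accumulators; same cost, more idiomatic.
-- Return-value equivalence on nonempty input (both raise on []).

-- ===== PORT A =====
-- A's loop over vals, simultaneously updating maxx/maxy/maxz, seeded from vals[0].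
def maxima_py (vals : List (Int × Int × Int)) : List Int :=
  match vals with
  | [] => []   -- vals[0] raises IndexError in Python; excluded by Pre_maxima_py
  | v :: _ =>
    let s := vals.foldl
      (fun (m : Int × Int × Int) val =>
        (if m.1 < val.1 then val.1 else m.1,
         if m.2.1 < val.2.1 then val.2.1 else m.2.1,
         if m.2.2 < val.2.2 then val.2.2 else m.2.2))
      (v.1, v.2.1, v.2.2)
    [s.1, s.2.1, s.2.2]

-- ===== PORT B =====
-- v[i] for a 3-tuple
def pvCol (i : Int) (v : Int × Int × Int) : Int :=
  if i = 0 then v.1 else if i = 1 then v.2.1 else v.2.2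

-- [max(v[i] for v in vals) for i in range(3)]
def maxima_py_alt (vals : List (Int × Int × Int)) : List Int :=
  (PySem.List.pyRange 0 3 1).map
    (fun i => (PySem.List.max? (vals.map (pvCol i)) (fun x => x)).getD 0)
  -- .getD 0 is unreachable under Pre_: max() raises ValueError on an empty column

-- ===== PRECONDITION & SPEC =====
-- A raises IndexError (and B ValueError) on the empty list.
def Pre_maxima_py (vals : List (Int × Int × Int)) : Prop := vals ≠ []
instance (vals : List (Int × Int × Int)) : Decidable (Pre_maxima_py vals) := by unfold Pre_maxima_py; infer_instance
def pvWitness_maxima_py : (List (Int × Int × Int)) := [(1, 2, 3), (5, 0, -4)]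

def Spec_maxima_py (vals : List (Int × Int × Int)) (out : List Int) : Prop := out = maxima_py_alt vals
instance (vals : List (Int × Int × Int)) (out : List Int) : Decidable (Spec_maxima_py vals out) := by unfold Spec_maxima_py; infer_instance

-- ===== CLAIM (what is proved, stated in full; the proofs are below) =====
def Claim_equal_maxima_py : Prop := ∀ (vals : List (Int × Int × Int)), Dom_maxima_py vals → Pre_maxima_py vals → Spec_maxima_py vals (maxima_py vals)

-- ===== LEMMAS AND PROOFS =====

theorem pv_if_max (m x : Int) : (if m < x then x else m) = max m x := by
  split <;> omega

theorem pv_foldl_proj (t : List (Int × Int × Int)) (m : Int × Int × Int) :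
    t.foldl
      (fun (m : Int × Int × Int) val =>
        (max m.1 val.1, max m.2.1 val.2.1, max m.2.2 val.2.2)) m
    = ((t.map (pvCol 0)).foldl max m.1,
       (t.map (pvCol 1)).foldl max m.2.1,
       (t.map (pvCol 2)).foldl max m.2.2) := by
  induction t generalizing m with
  | nil => rfl
  | cons v t ih =>
    simp only [List.foldl_cons, List.map_cons, ih, pvCol]
    norm_num

theorem maxima_py_spec : Claim_equal_maxima_py := by
  intro vals _ hpre
  unfold Spec_maxima_py
  match vals, hpre with
  | v :: t, _ =>
    show maxima_py (v :: t) = maxima_py_alt (v :: t)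
    simp only [maxima_py, maxima_py_alt]
    have hrange : PySem.List.pyRange 0 3 1 = [0, 1, 2] := by decide
    simp only [hrange, List.map_cons, List.map_nil, List.foldl_cons,
      pv_if_max, max_self, PySem.List.max?_id_cons, Option.getD_some, pv_foldl_proj]
    simp [pvCol]
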